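-- pv_equiv track=rewrite | github.com/Rishivarshney100/Offline-AI-PCB-defect-detection | vlm/tokenizer.py | encode_for_counting
-- ===== SOURCE A (Python) =====
-- from typing import List, Dict
--
-- def encode_for_counting(detections: List[Dict]) -> str:
--     if not detections:
--         return "Total defects: 0"
--     counts = {}
--     for d in detections:
--         t = d.get("defect_type", "Unknown")
--         counts[t] = counts.get(t, 0) + 1
--     lines = [f"Total defects: {len(detections)}", "Breakdown by type:"]
--     lines.extend(f"  - {t}: {c}" for t, c in sorted(counts.items()))
--     return "\n".join(lines)
-- ===== SOURCE B (Python) =====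
-- from typing import List, Dict
--
-- def encode_for_counting(detections: List[Dict]) -> str:
--     if not detections:
--         return "Total defects: 0"
--     types = sorted(d.get("defect_type", "Unknown") for d in detections)
--     groups = []
--     i = 0
--     while i < len(types):
--         run = 1
--         while i + run < len(types) and types[i + run] == types[i]:
--             run += 1
--         groups.append((types[i], run))
--         i += run
--     lines = [f"Total defects: {len(detections)}", "Breakdown by type:"]
--     lines.extend(f"  - {t}: {c}" for t, c in groups)
--     return "\n".join(lines)
-- ===== Notes on version B (the rewrite author's own statement) =====
-- stated objective: alternative
-- what changed: Replaces the dict-based counting pass plus sorted(items) with sorting the type strings first and counting consecutive runs in the sorted list (groupby-style scan), producing each breakdown pair directly.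
import Mathlib
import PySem

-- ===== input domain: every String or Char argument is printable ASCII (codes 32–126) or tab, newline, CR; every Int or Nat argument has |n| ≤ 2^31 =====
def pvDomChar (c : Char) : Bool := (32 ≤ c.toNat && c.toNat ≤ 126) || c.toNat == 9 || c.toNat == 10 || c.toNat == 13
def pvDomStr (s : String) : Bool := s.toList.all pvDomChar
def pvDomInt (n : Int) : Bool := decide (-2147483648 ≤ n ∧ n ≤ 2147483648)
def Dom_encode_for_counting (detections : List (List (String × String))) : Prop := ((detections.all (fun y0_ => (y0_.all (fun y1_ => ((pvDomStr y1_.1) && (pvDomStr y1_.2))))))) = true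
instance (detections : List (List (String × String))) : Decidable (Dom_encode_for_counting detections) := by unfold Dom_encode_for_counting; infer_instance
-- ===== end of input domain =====

-- B replaces A's dict-counting pass + sorted(items) by sorting the type strings first and
-- scanning consecutive runs (groupby-style); same output, a different algorithm.

-- shared helper: d.get("defect_type", "Unknown") on an association list (first match)
def pyGetType (d : List (String × String)) : String :=
  match d.find? (fun p => p.1 == "defect_type") with
  | some p => p.2
  | none => "Unknown"

-- ===== PORT A =====
def encode_for_counting (detections : List (List (String × String))) : String :=
  if detections = [] then "Total defects: 0"
  else
    let counts := detections.foldl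
      (fun (c : PySem.Dict String Int) d =>
        let t := pyGetType d
        c.insert t (c.getD t 0 + 1)) PySem.Dict.empty
    let lines := ["Total defects: " ++ PySem.Int.toStr (detections.length : Int), "Breakdown by type:"]
      ++ (PySem.List.sorted2 counts.items (fun p => p.1) (fun p => p.2)).map
           (fun p => "  - " ++ p.1 ++ ": " ++ PySem.Int.toStr p.2)
    PySem.Str.join "\n" lines

-- ===== PORT B =====
-- the run-length scan over the sorted type list (B's while-loop over runs)
def groupRuns : List String → List (String × Int)
  | [] => []
  | t :: rest =>
      (t, 1 + ((rest.takeWhile (fun x => x == t)).length : Int)) ::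
        groupRuns (rest.dropWhile (fun x => x == t))
termination_by s => s.length
decreasing_by
  have := List.length_dropWhile_le (fun x => x == t) rest
  simp only [List.length_cons]
  omega

def encode_for_counting_alt (detections : List (List (String × String))) : String :=
  if detections = [] then "Total defects: 0"
  else
    let types := PySem.List.sorted (detections.map (fun d => pyGetType d)) (fun x => x)
    let lines := ["Total defects: " ++ PySem.Int.toStr (detections.length : Int), "Breakdown by type:"]
      ++ (groupRuns types).map (fun p => "  - " ++ p.1 ++ ": " ++ PySem.Int.toStr p.2)
    PySem.Str.join "\n" lines

-- ===== PRECONDITION & SPEC =====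
def Spec_encode_for_counting (detections : List (List (String × String))) (out : String) : Prop := out = encode_for_counting_alt detections
instance (detections : List (List (String × String))) (out : String) : Decidable (Spec_encode_for_counting detections out) := by unfold Spec_encode_for_counting; infer_instance

-- ===== CLAIM (what is proved, stated in full; the proofs are below) =====
def Claim_equal_encode_for_counting : Prop := ∀ (detections : List (List (String × String))), Dom_encode_for_counting detections → Spec_encode_for_counting detections (encode_for_counting detections)

-- ===== LEMMAS AND PROOFS =====

lemma insertBy_congr {α : Type} (b1 b2 : α → α → Bool) (x : α) (ys : List α)
    (h : ∀ y ∈ ys, b1 x y = b2 x y) :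
    PySem.List.insertBy b1 x ys = PySem.List.insertBy b2 x ys := by
  induction ys with
  | nil => rfl
  | cons y ys ih =>
      have hy := h y (by simp)
      simp only [PySem.List.insertBy, hy]
      split
      · rfl
      · simp only [List.cons.injEq, true_and]
        exact ih (fun z hz => h z (by simp [hz]))

lemma foldl_insertBy_congr {α : Type} (b1 b2 : α → α → Bool) (P : α → Prop)
    (h : ∀ x y, P x → P y → b1 x y = b2 x y) :
    ∀ (xs acc : List α), (∀ x ∈ xs, P x) → (∀ y ∈ acc, P y) →
      xs.foldl (fun acc x => PySem.List.insertBy b1 x acc) acc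
        = xs.foldl (fun acc x => PySem.List.insertBy b2 x acc) acc := by
  intro xs
  induction xs with
  | nil => intro acc _ _; rfl
  | cons x xs ih =>
      intro acc hxs hacc
      have hx : P x := hxs x (by simp)
      have heq : PySem.List.insertBy b1 x acc = PySem.List.insertBy b2 x acc :=
        insertBy_congr b1 b2 x acc (fun y hy => h x y hx (hacc y hy))
      simp only [List.foldl_cons, heq]
      refine ih (PySem.List.insertBy b2 x acc) (fun z hz => hxs z (by simp [hz])) ?_
      intro y hy
      rcases (PySem.List.mem_insertBy b2 x y acc).1 hy with rfl | hy'
      · exact hx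
      · exact hacc y hy'

lemma sorted2_eq_sorted_fst (xs : List (String × Int))
    (h : ∀ a ∈ xs, ∀ b ∈ xs, a.1 = b.1 → a = b) :
    PySem.List.sorted2 xs (fun p => p.1) (fun p => p.2)
      = PySem.List.sorted xs (fun p => p.1) := by
  simp only [PySem.List.sorted2, PySem.List.sorted, if_neg (by decide : ¬ (false = true))]
  refine foldl_insertBy_congr _ _ (fun a => a ∈ xs) ?_ xs [] (fun x hx => hx) (by simp)
  intro a b ha hb
  by_cases h1 : a.1 < b.1
  · simp [h1]
  · by_cases h2 : b.1 < a.1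
    · simp [h1, h2]
    · have : a.1 = b.1 := le_antisymm (not_lt.1 h2) (not_lt.1 h1)
      have hab : a = b := h a ha b hb this
      subst hab
      simp

lemma dropWhile_cons_false {α : Type} (p : α → Bool) (l : List α) {h : α} {tl : List α}
    (he : l.dropWhile p = h :: tl) : p h = false := by
  induction l with
  | nil => simp at he
  | cons a l ih =>
      rw [List.dropWhile_cons] at he
      split at he
      · exact ih he
      · cases he; simp only [Bool.not_eq_true] at *; assumption

lemma fst_mem_groupRuns : ∀ (s : List String), ∀ p ∈ groupRuns s, p.1 ∈ s := by
  intro s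
  induction s using groupRuns.induct with
  | case1 => simp [groupRuns]
  | case2 t rest ih =>
      intro p hp
      rw [groupRuns] at hp
      rcases List.mem_cons.1 hp with rfl | hp'
      · simp
      · have := ih p hp'
        have hsub : (rest.dropWhile (fun x => x == t)).Sublist rest := List.dropWhile_sublist _
        exact List.mem_cons_of_mem _ (hsub.mem this)

lemma mem_fst_groupRuns : ∀ (s : List String) (k : String), k ∈ s → k ∈ (groupRuns s).map Prod.fst := by
  intro s
  induction s using groupRuns.induct with
  | case1 => simp
  | case2 t rest ih =>
      intro k hk
      rw [groupRuns]
      rcases List.mem_cons.1 hk with rfl | hk'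
      · simp
      · have hsplit := List.takeWhile_append_dropWhile (p := fun x => x == t) (l := rest)
        rw [← hsplit] at hk'
        rcases List.mem_append.1 hk' with htw | hdw
        · have : (k == t) = true := List.mem_takeWhile_imp (p := fun x => x == t) htw
          simp at this
          subst this
          simp
        · have := ih k hdw
          simp only [List.map_cons, List.mem_cons]
          right; exact this

lemma dropWhile_gt (t : String) (rest : List String) (hp : (t :: rest).Pairwise (· ≤ ·)) :
    ∀ x ∈ rest.dropWhile (fun y => y == t), t < x := by
  have hle : ∀ x ∈ rest, t ≤ x := (List.pairwise_cons.1 hp).1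
  have hps : rest.Pairwise (· ≤ ·) := (List.pairwise_cons.1 hp).2
  cases he : rest.dropWhile (fun y => y == t) with
  | nil => simp
  | cons h tl =>
      have hh : (h == t) = false := dropWhile_cons_false (fun y => y == t) rest he
      have hhne : h ≠ t := by simpa using hh
      have hsub : (rest.dropWhile (fun y => y == t)).Sublist rest := List.dropWhile_sublist _
      have hhm : h ∈ rest := hsub.mem (by simp [he])
      have hth : t < h := lt_of_le_of_ne (hle h hhm) (Ne.symm hhne)
      intro x hx
      rcases List.mem_cons.1 hx with rfl | hx'
      · exact hth
      · have hps' : (h :: tl).Pairwise (· ≤ ·) := he ▸ hps.sublist hsub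
        exact lt_of_lt_of_le hth ((List.pairwise_cons.1 hps').1 x hx')

lemma groupRuns_pairwise : ∀ (s : List String), s.Pairwise (· ≤ ·) →
    (groupRuns s).Pairwise (fun a b => a.1 < b.1) := by
  intro s
  induction s using groupRuns.induct with
  | case1 => simp [groupRuns]
  | case2 t rest ih =>
      intro hp
      rw [groupRuns]
      refine List.pairwise_cons.2 ⟨?_, ?_⟩
      · intro q hq
        exact dropWhile_gt t rest hp q.1 (fst_mem_groupRuns _ q hq)
      · exact ih (hp.sublist ((List.dropWhile_sublist _).trans (List.sublist_cons_self _ _)))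

lemma groupRuns_snd_count : ∀ (s : List String), s.Pairwise (· ≤ ·) →
    ∀ p ∈ groupRuns s, p.2 = (s.count p.1 : Int) := by
  intro s
  induction s using groupRuns.induct with
  | case1 => simp [groupRuns]
  | case2 t rest ih =>
      intro hp p hpmem
      have hgt : ∀ x ∈ rest.dropWhile (fun x => x == t), t < x := dropWhile_gt t rest hp
      rw [groupRuns] at hpmem
      have hca : ∀ x : String, rest.count x = (rest.takeWhile (fun a => a == t)).count x + (rest.dropWhile (fun a => a == t)).count x := by
        intro x
        conv_lhs => rw [← List.takeWhile_append_dropWhile (p := fun a => a == t) (l := rest)]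
        rw [List.count_append]
      rcases List.mem_cons.1 hpmem with rfl | hp'
      · have hcr : (rest.takeWhile (fun a => a == t)).count t = (rest.takeWhile (fun a => a == t)).length := by
          rw [List.count_eq_length]
          intro b hb
          have := List.mem_takeWhile_imp (p := fun x => x == t) hb
          have hb' : b = t := by simpa using this
          exact hb'.symm
        have hcs' : (rest.dropWhile (fun a => a == t)).count t = 0 := by
          rw [List.count_eq_zero]
          intro hmem
          exact absurd (hgt t hmem) (lt_irrefl t)
        rw [List.count_cons_self, hca t, hcr, hcs']
        push_cast
        ring
      · have ih' := ih (hp.sublist ((List.dropWhile_sublist _).trans (List.sublist_cons_self _ _))) p hp'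
        have hne : p.1 ≠ t := by
          have := hgt p.1 (fst_mem_groupRuns _ p hp')
          exact ne_of_gt this
        have hcr : (rest.takeWhile (fun a => a == t)).count p.1 = 0 := by
          rw [List.count_eq_zero]
          intro hmem
          have := List.mem_takeWhile_imp (p := fun x => x == t) hmem
          simp at this
          exact hne (this ▸ rfl)
        rw [ih']
        congr 1
        rw [List.count_cons_of_ne hne.symm, hca p.1, hcr]
        omega

lemma pairlists_eq (ts : List String) :
    PySem.List.sorted2 (PySem.Dict.counter ts).items (fun p => p.1) (fun p => p.2)
      = groupRuns (PySem.List.sorted ts (fun x => x)) := by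
  have hitems := PySem.Dict.items_counter ts
  have hs : (PySem.List.sorted ts (fun x => x)).Pairwise (· ≤ ·) :=
    PySem.List.sorted_pairwise ts (fun x => x)
  have hinj : ∀ a ∈ (PySem.Dict.counter ts).items, ∀ b ∈ (PySem.Dict.counter ts).items,
      a.1 = b.1 → a = b := by
    intro a ha b hb hab
    rw [hitems] at ha hb
    rcases List.mem_map.1 ha with ⟨k, _, rfl⟩
    rcases List.mem_map.1 hb with ⟨k', _, rfl⟩
    simp only at hab
    subst hab
    rfl
  rw [sorted2_eq_sorted_fst _ hinj]
  -- groupRuns equals its own key list mapped through k ↦ (k, count)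
  have hG : groupRuns (PySem.List.sorted ts (fun x => x))
      = ((groupRuns (PySem.List.sorted ts (fun x => x))).map Prod.fst).map
          (fun k => (k, (ts.count k : Int))) := by
    rw [List.map_map]
    conv_lhs => rw [← List.map_id (groupRuns (PySem.List.sorted ts (fun x => x)))]
    refine List.map_congr_left ?_
    intro p hp
    have h2 := groupRuns_snd_count _ hs p hp
    have hcnt : (PySem.List.sorted ts (fun x => x)).count p.1 = ts.count p.1 :=
      (PySem.List.sorted_perm ts (fun x => x) false).count_eq p.1
    simp only [Function.comp, id]
    ext
    · rfl
    · rw [h2, hcnt]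
  have hkeys_nodup : (((groupRuns (PySem.List.sorted ts (fun x => x))).map Prod.fst)).Nodup := by
    have := groupRuns_pairwise _ hs
    exact (List.pairwise_map.2 this).imp (fun h => ne_of_lt h)
  have hkeys_perm : ((groupRuns (PySem.List.sorted ts (fun x => x))).map Prod.fst).Perm
      (PySem.Set.ofList ts) := by
    refine (List.perm_ext_iff_of_nodup hkeys_nodup (PySem.Set.nodup_ofList ts)).2 ?_
    intro k
    constructor
    · intro hk
      rcases List.mem_map.1 hk with ⟨p, hp, rfl⟩
      have : p.1 ∈ PySem.List.sorted ts (fun x => x) := fst_mem_groupRuns _ p hp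
      have : p.1 ∈ ts := (PySem.List.mem_sorted _ _ _ _).1 this
      exact (PySem.Set.mem_ofList _ _).2 this
    · intro hk
      have : k ∈ ts := (PySem.Set.mem_ofList _ _).1 hk
      have : k ∈ PySem.List.sorted ts (fun x => x) := (PySem.List.mem_sorted _ _ _ _).2 this
      exact mem_fst_groupRuns _ k this
  refine PySem.List.sorted_eq_of_perm_of_pairwise_lt _ _ _ ?_ ?_
  · rw [hitems]
    exact hG ▸ hkeys_perm.map (fun k => (k, (ts.count k : Int)))
  · exact groupRuns_pairwise _ hs

lemma fold_eq_counter (detections : List (List (String × String))) :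
    detections.foldl
      (fun (c : PySem.Dict String Int) d =>
        let t := pyGetType d
        c.insert t (c.getD t 0 + 1)) PySem.Dict.empty
      = PySem.Dict.counter (detections.map (fun d => pyGetType d)) := by
  rw [← PySem.Dict.foldl_insert_getD_add_one_eq_counter, List.foldl_map]

-- ===== VERDICT (by name: the statement is the Claim_ definition above) =====
theorem encode_for_counting_spec : Claim_equal_encode_for_counting := by
  intro detections _
  unfold Spec_encode_for_counting
  by_cases hd : detections = []
  · simp [encode_for_counting, encode_for_counting_alt, hd]
  · simp only [encode_for_counting, encode_for_counting_alt, if_neg hd]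
    rw [fold_eq_counter, pairlists_eq]
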